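-- pv_equiv track=rewrite | github.com/Moishe/advent-of-code | day_17/3dlife.py | grid_from_set
-- ===== SOURCE A (Python) =====
-- xlat = {
--     True: '#',
--     False: '.'
-- }
--
-- def grid_from_set(board_set):
--     elements = list(board_set)
--     bounds = []
--     for i in range(4):
--         coordinates = [x[i] for x in elements]
--         bounds.append([min(coordinates), max(coordinates) + 1])
--
--     grid = []
--     for w in range(bounds[3][0], bounds[3][1]):
--         w_slice = []
--         for z in range(bounds[2][0], bounds[2][1]):
--             z_slice = []
--             for y in range(bounds[1][0], bounds[1][1]):
--                 row = []
--                 for x in range(bounds[0][0], bounds[0][1]):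
--                     row.append(xlat[(x,y,z,w) in board_set])
--                 z_slice.append(row)
--             w_slice.append(z_slice)
--         grid.append(w_slice)
--     return grid
-- ===== SOURCE B (Python) =====
-- def grid_from_set(board_set):
--     pts = list(board_set)
--     xs = [p[0] for p in pts]
--     ys = [p[1] for p in pts]
--     zs = [p[2] for p in pts]
--     ws = [p[3] for p in pts]
--     xmin, xmax = min(xs), max(xs)
--     ymin, ymax = min(ys), max(ys)
--     zmin, zmax = min(zs), max(zs)
--     wmin, wmax = min(ws), max(ws)
--     grid = [[[['.' for _ in range(xmax + 1 - xmin)]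
--               for _ in range(ymax + 1 - ymin)]
--              for _ in range(zmax + 1 - zmin)]
--             for _ in range(wmax + 1 - wmin)]
--     for (x, y, z, w) in pts:
--         grid[w - wmin][z - zmin][y - ymin][x - xmin] = '#'
--     return grid
-- ===== Notes on version B (the rewrite author's own statement) =====
-- stated objective: alternative
-- what changed: A scans every cell of the 4D bounding box and does a membership test per cell; B preallocates the '.'-filled grid and scatters '#' once per element of board_set, turning the dense O(volume*n) scan into O(volume + n*updates).
-- outside the precondition, e.g. on grid_from_set(set()): A raises ValueError, B raises ValueError
import Mathlib
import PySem

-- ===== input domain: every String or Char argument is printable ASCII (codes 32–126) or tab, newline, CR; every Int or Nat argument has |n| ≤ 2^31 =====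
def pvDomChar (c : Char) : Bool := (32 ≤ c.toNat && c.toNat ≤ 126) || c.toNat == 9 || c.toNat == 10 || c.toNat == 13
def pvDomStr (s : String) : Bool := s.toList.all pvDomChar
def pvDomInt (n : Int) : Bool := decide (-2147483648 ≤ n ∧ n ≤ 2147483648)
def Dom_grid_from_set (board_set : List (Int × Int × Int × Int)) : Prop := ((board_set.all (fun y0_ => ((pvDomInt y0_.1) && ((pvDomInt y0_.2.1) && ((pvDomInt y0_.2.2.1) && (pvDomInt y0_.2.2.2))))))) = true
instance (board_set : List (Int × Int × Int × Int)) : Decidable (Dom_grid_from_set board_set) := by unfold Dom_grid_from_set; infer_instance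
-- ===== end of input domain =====

-- B replaces A's dense scan (membership test at every grid cell) by preallocating a '.'-filled
-- grid and scattering '#' once per element of board_set (objective: alternative decomposition).

-- ===== PORT A =====
-- x[i] on a 4-tuple
def pvProj (i : Nat) (p : Int × Int × Int × Int) : Int :=
  match i with
  | 0 => p.1
  | 1 => p.2.1
  | 2 => p.2.2.1
  | _ => p.2.2.2

-- xlat[b]
def pvXlat (b : Bool) : String := if b then "#" else "."

def grid_from_set (board_set : List (Int × Int × Int × Int)) : List (List (List (List String))) :=
  let elements := board_set
  -- min/max of an empty list raise ValueError in Python; Pre_ excludes board_set = [], so .getD 0 is never reached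
  let bounds : List (List Int) := (PySem.List.pyRange 0 4 1).foldl (fun acc i =>
    let coordinates := elements.map (fun x => pvProj i.toNat x)
    acc ++ [[(PySem.List.min? coordinates (fun v => v)).getD 0,
             (PySem.List.max? coordinates (fun v => v)).getD 0 + 1]]) []
  let b := fun (j k : Nat) => ((bounds.getD j []).getD k 0)
  (PySem.List.pyRange (b 3 0) (b 3 1) 1).foldl (fun grid w =>
    let w_slice := (PySem.List.pyRange (b 2 0) (b 2 1) 1).foldl (fun ws z =>
      let z_slice := (PySem.List.pyRange (b 1 0) (b 1 1) 1).foldl (fun zs y =>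
        let row := (PySem.List.pyRange (b 0 0) (b 0 1) 1).foldl (fun r x =>
          r ++ [pvXlat (board_set.contains (x, y, z, w))]) []
        zs ++ [row]) []
      ws ++ [z_slice]) []
    grid ++ [w_slice]) []

-- ===== PORT B =====
-- grid[iw][iz][iy][ix] = '#'
def pvSet4 (g : List (List (List (List String)))) (iw iz iy ix : Nat) : List (List (List (List String))) :=
  g.modify iw (fun ws => ws.modify iz (fun zs => zs.modify iy (fun row => row.set ix "#")))

def grid_from_set_alt (board_set : List (Int × Int × Int × Int)) : List (List (List (List String))) :=
  let pts := board_set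
  let xs := pts.map (fun p => p.1)
  let ys := pts.map (fun p => p.2.1)
  let zs := pts.map (fun p => p.2.2.1)
  let ws := pts.map (fun p => p.2.2.2)
  -- min/max of an empty list raise ValueError in Python; Pre_ excludes board_set = [], so .getD 0 is never reached
  let xmin := (PySem.List.min? xs (fun v => v)).getD 0
  let xmax := (PySem.List.max? xs (fun v => v)).getD 0
  let ymin := (PySem.List.min? ys (fun v => v)).getD 0
  let ymax := (PySem.List.max? ys (fun v => v)).getD 0
  let zmin := (PySem.List.min? zs (fun v => v)).getD 0
  let zmax := (PySem.List.max? zs (fun v => v)).getD 0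
  let wmin := (PySem.List.min? ws (fun v => v)).getD 0
  let wmax := (PySem.List.max? ws (fun v => v)).getD 0
  let grid := List.replicate (wmax + 1 - wmin).toNat
                (List.replicate (zmax + 1 - zmin).toNat
                  (List.replicate (ymax + 1 - ymin).toNat
                    (List.replicate (xmax + 1 - xmin).toNat ".")))
  pts.foldl (fun g q =>
    pvSet4 g (q.2.2.2 - wmin).toNat (q.2.2.1 - zmin).toNat (q.2.1 - ymin).toNat (q.1 - xmin).toNat) grid

-- ===== PRECONDITION & SPEC =====
-- Pre_ excludes only the empty list, on which Python A raises ValueError (min of an empty sequence)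
def Pre_grid_from_set (board_set : List (Int × Int × Int × Int)) : Prop :=
  board_set ≠ []  -- any nonempty board_set, e.g. [(0, 1, 2, 0)], is admitted
instance (board_set : List (Int × Int × Int × Int)) : Decidable (Pre_grid_from_set board_set) := by unfold Pre_grid_from_set; infer_instance
def pvWitness_grid_from_set : (List (Int × Int × Int × Int)) := [(-7, 11, -13, 17)]

def Spec_grid_from_set (board_set : List (Int × Int × Int × Int)) (out : List (List (List (List String)))) : Prop := out = grid_from_set_alt board_set
instance (board_set : List (Int × Int × Int × Int)) (out : List (List (List (List String)))) : Decidable (Spec_grid_from_set board_set out) := by unfold Spec_grid_from_set; infer_instance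

-- ===== CLAIM (what is proved, stated in full; the proofs are below) =====
def Claim_equal_grid_from_set : Prop := ∀ (board_set : List (Int × Int × Int × Int)), Dom_grid_from_set board_set → Pre_grid_from_set board_set → Spec_grid_from_set board_set (grid_from_set board_set)

-- ===== LEMMAS AND PROOFS =====

-- the dense grid both programs compute: one cell per point of the bounding box
def pvDense (s : List (Int × Int × Int × Int)) (x0 x1 y0 y1 z0 z1 w0 w1 : Int) : List (List (List (List String))) :=
  (PySem.List.pyRange w0 w1 1).map (fun w =>
    (PySem.List.pyRange z0 z1 1).map (fun z =>
      (PySem.List.pyRange y0 y1 1).map (fun y =>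
        (PySem.List.pyRange x0 x1 1).map (fun x => pvXlat (s.contains (x, y, z, w))))))

lemma modify_map_pyRange {α : Type} (f : Int → α) (F : α → α) :
    ∀ (n : Nat) (a b q : Int), (q - a).toNat = n → a ≤ q → q < b →
    (((PySem.List.pyRange a b 1).map f).modify (q - a).toNat F)
      = (PySem.List.pyRange a b 1).map (fun v => if v = q then F (f v) else f v) := by
  intro n
  induction n with
  | zero =>
    intro a b q hn h1 h2
    have hq : q = a := by omega
    subst hq
    rw [PySem.List.pyRange_one_cons h2]
    simp only [List.map_cons, hn, List.modify_zero_cons, if_true]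
    congr 1
    apply List.map_congr_left
    intro v hv
    have := PySem.List.mem_pyRange_one.mp hv
    rw [if_neg (by omega)]
  | succ n ih =>
    intro a b q hn h1 h2
    have hab : a < b := by omega
    rw [PySem.List.pyRange_one_cons hab]
    simp only [List.map_cons, hn, List.modify_succ_cons]
    rw [if_neg (show ¬ a = q by omega)]
    congr 1
    have hn' : (q - (a + 1)).toNat = n := by omega
    have := ih (a + 1) b q hn' (by omega) h2
    rw [hn'] at this
    exact this

lemma contains_append_single_ne (t : List (Int × Int × Int × Int)) (q c : Int × Int × Int × Int)
    (h : c ≠ q) : (t ++ [q]).contains c = t.contains c := by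
  simp [List.contains_eq_mem, h]

lemma row_miss (t : List (Int × Int × Int × Int)) (q : Int × Int × Int × Int)
    (x0 x1 y z w : Int) (h : ¬(y = q.2.1 ∧ z = q.2.2.1 ∧ w = q.2.2.2)) :
    (PySem.List.pyRange x0 x1 1).map (fun x => pvXlat ((t ++ [q]).contains (x, y, z, w)))
      = (PySem.List.pyRange x0 x1 1).map (fun x => pvXlat (t.contains (x, y, z, w))) := by
  apply List.map_congr_left
  intro x _
  rw [contains_append_single_ne]
  intro he
  apply h
  obtain ⟨qx, qy, qz, qw⟩ := q
  simp_all [Prod.ext_iff]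

lemma plane_miss (t : List (Int × Int × Int × Int)) (q : Int × Int × Int × Int)
    (x0 x1 y0 y1 z w : Int) (h : ¬(z = q.2.2.1 ∧ w = q.2.2.2)) :
    (PySem.List.pyRange y0 y1 1).map (fun y => (PySem.List.pyRange x0 x1 1).map (fun x => pvXlat ((t ++ [q]).contains (x, y, z, w))))
      = (PySem.List.pyRange y0 y1 1).map (fun y => (PySem.List.pyRange x0 x1 1).map (fun x => pvXlat (t.contains (x, y, z, w)))) := by
  apply List.map_congr_left
  intro y _
  exact row_miss t q x0 x1 y z w (by tauto)

lemma cube_miss (t : List (Int × Int × Int × Int)) (q : Int × Int × Int × Int)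
    (x0 x1 y0 y1 z0 z1 w : Int) (h : ¬(w = q.2.2.2)) :
    (PySem.List.pyRange z0 z1 1).map (fun z => (PySem.List.pyRange y0 y1 1).map (fun y => (PySem.List.pyRange x0 x1 1).map (fun x => pvXlat ((t ++ [q]).contains (x, y, z, w)))))
      = (PySem.List.pyRange z0 z1 1).map (fun z => (PySem.List.pyRange y0 y1 1).map (fun y => (PySem.List.pyRange x0 x1 1).map (fun x => pvXlat (t.contains (x, y, z, w))))) := by
  apply List.map_congr_left
  intro z _
  exact plane_miss t q x0 x1 y0 y1 z w (by tauto)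

lemma pvSet4_dense (t : List (Int × Int × Int × Int)) (q : Int × Int × Int × Int)
    (x0 x1 y0 y1 z0 z1 w0 w1 : Int)
    (hx : x0 ≤ q.1 ∧ q.1 < x1) (hy : y0 ≤ q.2.1 ∧ q.2.1 < y1)
    (hz : z0 ≤ q.2.2.1 ∧ q.2.2.1 < z1) (hw : w0 ≤ q.2.2.2 ∧ q.2.2.2 < w1) :
    pvSet4 (pvDense t x0 x1 y0 y1 z0 z1 w0 w1)
      (q.2.2.2 - w0).toNat (q.2.2.1 - z0).toNat (q.2.1 - y0).toNat (q.1 - x0).toNat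
      = pvDense (t ++ [q]) x0 x1 y0 y1 z0 z1 w0 w1 := by
  obtain ⟨qx, qy, qz, qw⟩ := q
  simp only [pvSet4, pvDense] at *
  rw [modify_map_pyRange _ _ _ w0 w1 qw rfl hw.1 hw.2]
  apply List.map_congr_left
  intro w hw'
  by_cases hwq : w = qw
  · subst hwq
    rw [if_pos rfl, modify_map_pyRange _ _ _ z0 z1 qz rfl hz.1 hz.2]
    apply List.map_congr_left
    intro z hz'
    by_cases hzq : z = qz
    · subst hzq
      rw [if_pos rfl, modify_map_pyRange _ _ _ y0 y1 qy rfl hy.1 hy.2]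
      apply List.map_congr_left
      intro y hy'
      by_cases hyq : y = qy
      · subst hyq
        rw [if_pos rfl, List.set_eq_modify, modify_map_pyRange _ _ _ x0 x1 qx rfl hx.1 hx.2]
        apply List.map_congr_left
        intro x hx'
        by_cases hxq : x = qx
        · subst hxq
          rw [if_pos rfl]
          have : (t ++ [(x, y, z, w)]).contains (x, y, z, w) = true := by
            simp
          rw [this]
          rfl
        · rw [if_neg hxq, contains_append_single_ne _ _ _ (by simp [Prod.ext_iff, hxq])]
      · rw [if_neg hyq]
        exact (row_miss t (qx, qy, z, w) x0 x1 y z w (by simp [hyq])).symm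
    · rw [if_neg hzq]
      exact (plane_miss t (qx, qy, qz, w) x0 x1 y0 y1 z w (by simp [hzq])).symm
  · rw [if_neg hwq]
    exact (cube_miss t (qx, qy, qz, qw) x0 x1 y0 y1 z0 z1 w (by simpa using hwq)).symm

lemma scatter_eq (x0 x1 y0 y1 z0 z1 w0 w1 : Int) :
    ∀ (l t : List (Int × Int × Int × Int)),
    (∀ q ∈ l, (x0 ≤ q.1 ∧ q.1 < x1) ∧ (y0 ≤ q.2.1 ∧ q.2.1 < y1) ∧
              (z0 ≤ q.2.2.1 ∧ q.2.2.1 < z1) ∧ (w0 ≤ q.2.2.2 ∧ q.2.2.2 < w1)) →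
    l.foldl (fun g q =>
        pvSet4 g (q.2.2.2 - w0).toNat (q.2.2.1 - z0).toNat (q.2.1 - y0).toNat (q.1 - x0).toNat)
      (pvDense t x0 x1 y0 y1 z0 z1 w0 w1)
      = pvDense (t ++ l) x0 x1 y0 y1 z0 z1 w0 w1 := by
  intro l
  induction l with
  | nil => intro t _; simp
  | cons q l ih =>
    intro t hb
    simp only [List.foldl_cons]
    obtain ⟨h1, h2, h3, h4⟩ := hb q (List.mem_cons_self ..)
    rw [pvSet4_dense t q x0 x1 y0 y1 z0 z1 w0 w1 h1 h2 h3 h4]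
    rw [ih (t ++ [q]) (fun p hp => hb p (List.mem_cons_of_mem _ hp))]
    simp

lemma A_dense (s : List (Int × Int × Int × Int)) :
    grid_from_set s = pvDense s
      ((PySem.List.min? (s.map (fun p => p.1)) (fun v => v)).getD 0)
      ((PySem.List.max? (s.map (fun p => p.1)) (fun v => v)).getD 0 + 1)
      ((PySem.List.min? (s.map (fun p => p.2.1)) (fun v => v)).getD 0)
      ((PySem.List.max? (s.map (fun p => p.2.1)) (fun v => v)).getD 0 + 1)
      ((PySem.List.min? (s.map (fun p => p.2.2.1)) (fun v => v)).getD 0)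
      ((PySem.List.max? (s.map (fun p => p.2.2.1)) (fun v => v)).getD 0 + 1)
      ((PySem.List.min? (s.map (fun p => p.2.2.2)) (fun v => v)).getD 0)
      ((PySem.List.max? (s.map (fun p => p.2.2.2)) (fun v => v)).getD 0 + 1) := by
  have hr : PySem.List.pyRange 0 4 1 = [0, 1, 2, 3] := by decide
  simp only [grid_from_set, pvDense, hr, List.foldl_cons, List.foldl_nil, List.nil_append,
    List.cons_append, pvProj, Int.toNat_zero, Int.toNat_one, List.getD, List.getElem?_cons_zero,
    List.getElem?_cons_succ, Option.getD_some,
    PySem.List.foldl_append_singleton_eq_map]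
  rfl

lemma dense_nil (x0 x1 y0 y1 z0 z1 w0 w1 : Int) :
    pvDense [] x0 x1 y0 y1 z0 z1 w0 w1
      = List.replicate (w1 - w0).toNat (List.replicate (z1 - z0).toNat
          (List.replicate (y1 - y0).toNat (List.replicate (x1 - x0).toNat "."))) := by
  simp [pvDense, pvXlat, List.map_const', PySem.List.length_pyRange_one]

lemma B_dense (s : List (Int × Int × Int × Int)) (h : s ≠ []) :
    grid_from_set_alt s = pvDense s
      ((PySem.List.min? (s.map (fun p => p.1)) (fun v => v)).getD 0)
      ((PySem.List.max? (s.map (fun p => p.1)) (fun v => v)).getD 0 + 1)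
      ((PySem.List.min? (s.map (fun p => p.2.1)) (fun v => v)).getD 0)
      ((PySem.List.max? (s.map (fun p => p.2.1)) (fun v => v)).getD 0 + 1)
      ((PySem.List.min? (s.map (fun p => p.2.2.1)) (fun v => v)).getD 0)
      ((PySem.List.max? (s.map (fun p => p.2.2.1)) (fun v => v)).getD 0 + 1)
      ((PySem.List.min? (s.map (fun p => p.2.2.2)) (fun v => v)).getD 0)
      ((PySem.List.max? (s.map (fun p => p.2.2.2)) (fun v => v)).getD 0 + 1) := by
  have hbound : ∀ (f : (Int × Int × Int × Int) → Int) (q : Int × Int × Int × Int), q ∈ s →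
      ((PySem.List.min? (s.map f) (fun v => v)).getD 0 ≤ f q ∧
       f q ≤ (PySem.List.max? (s.map f) (fun v => v)).getD 0) := by
    intro f q hq
    have hne : s.map f ≠ [] := by simp [h]
    cases hmn : PySem.List.min? (s.map f) (fun v => v) with
    | none => exact absurd ((PySem.List.min?_eq_none_iff _ _).mp hmn) hne
    | some m =>
      cases hmx : PySem.List.max? (s.map f) (fun v => v) with
      | none => exact absurd ((PySem.List.max?_eq_none_iff _ _).mp hmx) hne
      | some M =>
        refine ⟨?_, ?_⟩
        · simpa using PySem.List.min?_isMin hmn (f q) (List.mem_map_of_mem hq)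
        · simpa using PySem.List.max?_isMax hmx (f q) (List.mem_map_of_mem hq)
  simp only [grid_from_set_alt]
  rw [← dense_nil, scatter_eq _ _ _ _ _ _ _ _ s []
    (fun q hq => ⟨⟨(hbound (fun p => p.1) q hq).1, by have := (hbound (fun p => p.1) q hq).2; omega⟩,
                 ⟨(hbound (fun p => p.2.1) q hq).1, by have := (hbound (fun p => p.2.1) q hq).2; omega⟩,
                 ⟨(hbound (fun p => p.2.2.1) q hq).1, by have := (hbound (fun p => p.2.2.1) q hq).2; omega⟩,
                 ⟨(hbound (fun p => p.2.2.2) q hq).1, by have := (hbound (fun p => p.2.2.2) q hq).2; omega⟩⟩),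
    List.nil_append]

-- ===== VERDICT (by name: the statement is the Claim_ definition above) =====
theorem grid_from_set_spec : Claim_equal_grid_from_set := by
  intro s _ hpre
  unfold Spec_grid_from_set
  rw [A_dense s, B_dense s hpre]
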